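-- pv_equiv track=rewrite | github.com/Gagnon-lab/takasugi-genetics | py_scripts/barcode_utils.py | countEdits
-- ===== SOURCE A (Python) =====
-- def is_multiallelic(siteEdit):
-- 	if '&' in siteEdit:
-- 		return True
-- 	else:
-- 		return False
--
-- def countEdits(barcodeString):
-- 	edits_by_site = barcodeString.split("_")
-- 	edits_set = set(edits_by_site)
--
-- 	edits_set.discard('NONE')
-- 	uniqEdits_list = list(edits_set)
--
-- 	allEdits = []
-- 	for x in uniqEdits_list:
-- 		if is_multiallelic(x):
-- 			allEdits.extend(x.split("&"))
-- 		else: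
-- 			allEdits.append(x)
--
-- 	return len(allEdits)
-- ===== SOURCE B (Python) =====
-- def countEdits(barcodeString):
--     # sort-then-scan: sorting groups equal site-edits together, so one linear
--     # scan skipping adjacent duplicates (and the 'NONE' sentinel) counts each
--     # distinct edit once, adding count('&')+1 alleles for it.
--     total = 0
--     prev = None
--     for t in sorted(barcodeString.split("_")):
--         if t != prev and t != 'NONE':
--             total += t.count('&') + 1
--         prev = t
--     return total
-- ===== Notes on version B (the rewrite author's own statement) =====
-- stated objective: alternative
-- what changed: Replaces A's hash-set deduplication plus branch/split/extend list building with a sort-then-scan: sort the '_'-tokens, one linear pass skipping adjacent duplicates and the 'NONE' sentinel while accumulating count('&')+1 per distinct edit.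
import Mathlib
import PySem

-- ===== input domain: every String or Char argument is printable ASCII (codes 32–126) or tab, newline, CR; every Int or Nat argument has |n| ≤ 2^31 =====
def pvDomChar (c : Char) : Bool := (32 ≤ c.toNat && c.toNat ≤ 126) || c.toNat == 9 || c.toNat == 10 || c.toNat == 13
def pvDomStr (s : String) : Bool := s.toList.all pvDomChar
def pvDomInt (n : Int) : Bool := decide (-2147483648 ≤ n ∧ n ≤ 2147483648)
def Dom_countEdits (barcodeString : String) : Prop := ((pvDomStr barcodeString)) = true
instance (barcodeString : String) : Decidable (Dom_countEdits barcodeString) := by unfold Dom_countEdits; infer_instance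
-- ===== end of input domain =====

-- B replaces A's hash-set dedup plus branch/split/extend list building with a sort-then-scan:
-- sort the tokens, one pass skipping adjacent duplicates and 'NONE', accumulating count('&')+1 (alternative algorithm; same result).

-- ===== PORT A =====
-- s.split(sep) for a literal non-empty sep: Str.split? is none only for sep = "", so getD is exact here
def pySplit (s sep : String) : List String := (PySem.Str.split? s sep).getD []

def isMultiallelic (siteEdit : String) : Bool :=
  if PySem.Str.isIn "&" siteEdit then true else false

def countEdits (barcodeString : String) : Int :=
  let edits_by_site := pySplit barcodeString "_"
  let edits_set := PySem.Set.ofList edits_by_site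
  let edits_set2 := PySem.Set.discard edits_set "NONE"
  let uniqEdits_list := edits_set2
  -- iteration over the set: only the final LENGTH is used, which is order-independent
  let allEdits := uniqEdits_list.foldl
    (fun acc x => if isMultiallelic x then acc ++ pySplit x "&" else acc ++ [x]) []
  (allEdits.length : Int)

-- ===== PORT B =====
def countEdits_alt (barcodeString : String) : Int :=
  let toks := PySem.List.sorted (pySplit barcodeString "_") (fun x => x) false
  (toks.foldl
    (fun (st : Int × Option String) t =>
      if some t ≠ st.2 ∧ t ≠ "NONE"
      then (st.1 + ((PySem.Str.count t "&" : Int) + 1), some t)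
      else (st.1, some t))
    (0, none)).1

-- ===== PRECONDITION & SPEC =====
def Spec_countEdits (barcodeString : String) (out : Int) : Prop := out = countEdits_alt barcodeString
instance (barcodeString : String) (out : Int) : Decidable (Spec_countEdits barcodeString out) := by unfold Spec_countEdits; infer_instance

-- ===== CLAIM =====
def Claim_equal_countEdits : Prop := ∀ (barcodeString : String), Dom_countEdits barcodeString → Spec_countEdits barcodeString (countEdits barcodeString)

-- ===== LEMMAS AND PROOFS =====

-- ---- A side: each distinct edit x contributes count(x,'&')+1 pieces ----
def ampMatches : List Char → Nat
  | [] => 0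
  | c :: t => if (['&'] : List Char).isPrefixOf (c :: t) then ampMatches t + 1 else ampMatches t

theorem count_go_eq_ampMatches : ∀ (l : List Char) (fuel : Nat) (acc : Nat),
    l.length ≤ fuel → PySem.Chars.count.go ['&'] fuel l acc = acc + ampMatches l := by
  intro l
  induction l with
  | nil => intro fuel acc _; cases fuel <;> simp [PySem.Chars.count.go, ampMatches]
  | cons c t ih =>
    intro fuel acc h
    cases fuel with
    | zero => simp at h
    | succ f =>
      simp only [List.length_cons, Nat.add_le_add_iff_right] at h
      by_cases hp : (['&'] : List Char).isPrefixOf (c :: t)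
      · simp [PySem.Chars.count.go, hp, ampMatches, ih f (acc + 1) h]; omega
      · simp [PySem.Chars.count.go, hp, ampMatches, ih f acc h]

theorem splitOn_go_length : ∀ (l : List Char) (fuel : Nat) (cur : List Char) (acc : List (List Char)),
    l.length < fuel →
    (PySem.Chars.splitOn.go ['&'] fuel l cur acc).length = acc.length + 1 + ampMatches l := by
  intro l
  induction l with
  | nil =>
    intro fuel cur acc h
    cases fuel with
    | zero => simp at h
    | succ f => simp [PySem.Chars.splitOn.go, ampMatches]
  | cons c t ih =>
    intro fuel cur acc h
    cases fuel with
    | zero => simp at h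
    | succ f =>
      simp only [List.length_cons, Nat.succ_lt_succ_iff] at h
      by_cases hp : (['&'] : List Char).isPrefixOf (c :: t)
      · simp [PySem.Chars.splitOn.go, hp, ampMatches, ih f [] (cur.reverse :: acc) h]; omega
      · simp [PySem.Chars.splitOn.go, hp, ampMatches, ih f (c :: cur) acc h]

theorem ampMatches_eq_zero_of_not_isIn (l : List Char) (h : PySem.Chars.isIn ['&'] l = false) :
    ampMatches l = 0 := by
  induction l with
  | nil => simp [ampMatches]
  | cons c t ih =>
    rw [PySem.Chars.isIn_eq_false_iff] at h
    have hni : ¬ (['&'] : List Char) <:+: t := fun hinf => h (hinf.trans (List.suffix_cons c t).isInfix)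
    have hp : (['&'] : List Char).isPrefixOf (c :: t) = false := by
      by_contra hb
      exact h ((List.isPrefixOf_iff_prefix.mp (by simpa using hb)).isInfix)
    simp [ampMatches, hp, ih ((PySem.Chars.isIn_eq_false_iff _ _).mpr hni)]

theorem count_amp (x : String) : PySem.Str.count x "&" = ampMatches x.toList := by
  rw [PySem.Str.count_eq]
  show PySem.Chars.count x.toList ['&'] = _
  unfold PySem.Chars.count
  simp
  rw [count_go_eq_ampMatches x.toList x.length 0 (by simp)]
  omega

theorem isIn_amp (x : String) : PySem.Chars.isIn ['&'] x.toList = PySem.Str.isIn "&" x := by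
  simp [PySem.Str.isIn_eq]

theorem piece_length (x : String) :
    ((if isMultiallelic x then pySplit x "&" else [x]).length : Int)
      = (PySem.Str.count x "&" : Int) + 1 := by
  rw [count_amp]
  by_cases hin : PySem.Str.isIn "&" x
  · have hsp : pySplit x "&" = (PySem.Chars.splitOn x.toList ['&']).map String.ofList := by
      simp [pySplit, PySem.Str.split?, PySem.Chars.split?]
    simp only [isMultiallelic, hin, if_true, hsp, PySem.Chars.splitOn, List.length_map]
    rw [splitOn_go_length x.toList (x.toList.length + 1) [] [] (by omega)]
    simp
    omega
  · have h0 : ampMatches x.toList = 0 := by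
      apply ampMatches_eq_zero_of_not_isIn
      rw [isIn_amp]
      simpa using hin
    have hm : isMultiallelic x = false := by
      simp only [isMultiallelic, if_neg hin]
    simp [hm, h0]

def editVal (x : String) : Int := (PySem.Str.count x "&" : Int) + 1

theorem a_fold_length (l : List String) : ∀ (accA : List String),
    ((l.foldl (fun acc x => if isMultiallelic x then acc ++ pySplit x "&" else acc ++ [x]) accA).length : Int)
      = (accA.length : Int) + (l.map editVal).sum := by
  induction l with
  | nil => intro accA; simp
  | cons x t ih =>
    intro accA
    simp only [List.foldl_cons, List.map_cons, List.sum_cons]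
    rw [ih]
    have hp := piece_length x
    by_cases hm : isMultiallelic x <;>
      simp only [editVal, hm, Bool.false_eq_true, if_true, if_false, List.length_append,
        Nat.cast_add, List.length_cons, List.length_nil] at hp ⊢ <;> omega

-- ---- B side: the scan keeps exactly the adjacent-dedup of the sorted list ----
def dedupScan : Option String → List String → List String
  | _, [] => []
  | prev, t :: rest => if some t = prev then dedupScan (some t) rest else t :: dedupScan (some t) rest

theorem alt_fold_eq (l : List String) : ∀ (prev : Option String) (acc : Int),
    (l.foldl
      (fun (st : Int × Option String) t =>
        if some t ≠ st.2 ∧ t ≠ "NONE"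
        then (st.1 + ((PySem.Str.count t "&" : Int) + 1), some t)
        else (st.1, some t))
      (acc, prev)).1
    = acc + (((dedupScan prev l).filter (fun t => t ≠ "NONE")).map editVal).sum := by
  induction l with
  | nil => intro prev acc; simp [dedupScan]
  | cons t rest ih =>
    intro prev acc
    by_cases hp : some t = prev
    · have hcond : ¬ (some t ≠ prev ∧ t ≠ "NONE") := by simp [hp]
      simp only [List.foldl_cons, if_neg hcond, dedupScan, if_pos hp]
      exact ih (some t) acc
    · by_cases hn : t = "NONE"
      · have hcond : ¬ (some t ≠ prev ∧ t ≠ "NONE") := by simp [hn]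
        simp only [List.foldl_cons, if_neg hcond, dedupScan, if_neg hp]
        rw [ih (some t) acc]
        simp [hn]
      · have hcond : (some t ≠ prev ∧ t ≠ "NONE") := ⟨hp, hn⟩
        simp only [List.foldl_cons, if_pos hcond, dedupScan, if_neg hp]
        rw [ih (some t) (acc + ((PySem.Str.count t "&" : Int) + 1))]
        simp only [List.filter_cons, decide_eq_true_eq]
        rw [if_pos (by simpa using hn)]
        simp only [List.map_cons, List.sum_cons, editVal]
        ring

theorem dedupScan_subset : ∀ (prev : Option String) (l : List String) (x : String),
    x ∈ dedupScan prev l → x ∈ l := by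
  intro prev l
  induction l generalizing prev with
  | nil => intro x h; simp [dedupScan] at h
  | cons t rest ih =>
    intro x h
    by_cases hp : some t = prev
    · simp only [dedupScan, if_pos hp] at h
      exact List.mem_cons_of_mem _ (ih (some t) x h)
    · simp only [dedupScan, if_neg hp] at h
      rcases List.mem_cons.mp h with h | h
      · exact h ▸ List.mem_cons_self
      · exact List.mem_cons_of_mem _ (ih (some t) x h)

theorem mem_dedupScan_of_mem : ∀ (prev : Option String) (l : List String) (x : String),
    x ∈ l → x ∈ dedupScan prev l ∨ prev = some x := by
  intro prev l
  induction l generalizing prev with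
  | nil => intro x h; simp at h
  | cons t rest ih =>
    intro x h
    rcases List.mem_cons.mp h with hx | hx
    · subst hx
      by_cases hp : some x = prev
      · exact Or.inr hp.symm
      · simp only [dedupScan, if_neg hp]
        exact Or.inl List.mem_cons_self
    · have hIH := ih (some t) x hx
      by_cases hp : some t = prev
      · simp only [dedupScan, if_pos hp]
        rcases hIH with hin | heq
        · exact Or.inl hin
        · exact Or.inr (hp ▸ heq)
      · simp only [dedupScan, if_neg hp]
        rcases hIH with hin | heq
        · exact Or.inl (List.mem_cons_of_mem _ hin)
        · have : t = x := by injection heq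
          exact Or.inl (this ▸ List.mem_cons_self)

theorem dedupScan_pairwise : ∀ (l : List String) (prev : Option String),
    l.Pairwise (· ≤ ·) → (∀ p, prev = some p → ∀ y ∈ l, p ≤ y) →
    (dedupScan prev l).Pairwise (· < ·) ∧
      (∀ p, prev = some p → ∀ y ∈ dedupScan prev l, p < y) := by
  intro l
  induction l with
  | nil => intro prev _ _; exact ⟨List.Pairwise.nil, by intro p _ y hy; simp [dedupScan] at hy⟩
  | cons t rest ih =>
    intro prev hpw hprev
    have hle : ∀ y ∈ rest, t ≤ y := (List.pairwise_cons.mp hpw).1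
    have hpwr : rest.Pairwise (· ≤ ·) := (List.pairwise_cons.mp hpw).2
    have hIH := ih (some t) hpwr (by intro p hp y hy; injection hp with hp; exact hp ▸ hle y hy)
    by_cases hp : some t = prev
    · simp only [dedupScan, if_pos hp]
      refine ⟨hIH.1, ?_⟩
      intro p hpe y hy
      have : p = t := by rw [← hp] at hpe; injection hpe with h; exact h.symm
      exact this ▸ hIH.2 t rfl y hy
    · simp only [dedupScan, if_neg hp]
      constructor
      · exact List.pairwise_cons.mpr ⟨hIH.2 t rfl, hIH.1⟩
      · intro p hpe y hy
        have hpt : p ≤ t := hprev p hpe t List.mem_cons_self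
        have hne : p ≠ t := by
          intro h; exact hp (by rw [hpe, h])
        have hplt : p < t := lt_of_le_of_ne hpt hne
        rcases List.mem_cons.mp hy with h | h
        · exact h ▸ hplt
        · exact lt_trans hplt (hIH.2 t rfl y h)

-- ===== VERDICT =====
theorem countEdits_spec : Claim_equal_countEdits := by
  intro s _
  unfold Spec_countEdits countEdits countEdits_alt
  simp only []
  set toks := pySplit s "_" with htoks
  set st := PySem.List.sorted toks (fun x => x) false with hst
  set S := PySem.Set.discard (PySem.Set.ofList toks) "NONE" with hS
  set D := (dedupScan none st).filter (fun t => t ≠ "NONE") with hD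
  rw [a_fold_length, alt_fold_eq]
  simp only [List.length_nil, Nat.cast_zero, zero_add]
  -- S and D are nodup lists with the same members, hence a permutation
  have hSnd : S.Nodup := PySem.Set.nodup_discard _ _ (PySem.Set.nodup_ofList _)
  have hscan_pw : (dedupScan none st).Pairwise (· < ·) := by
    have := dedupScan_pairwise st none
      (by simpa using PySem.List.sorted_pairwise (xs := toks) (key := fun x => x))
      (by intro p hp; cases hp)
    exact this.1
  have hDnd : D.Nodup := (hscan_pw.imp (fun h => ne_of_lt h)).filter _
  have hmem : ∀ x, x ∈ D ↔ x ∈ S := by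
    intro x
    rw [hD, List.mem_filter, hS]
    rw [PySem.Set.mem_discard, PySem.Set.mem_ofList]
    constructor
    · rintro ⟨hin, hne⟩
      refine ⟨?_, by simpa using hne⟩
      have := dedupScan_subset none st x hin
      rwa [hst, PySem.List.mem_sorted] at this
    · rintro ⟨hin, hne⟩
      have hin' : x ∈ st := by rwa [hst, PySem.List.mem_sorted]
      rcases mem_dedupScan_of_mem none st x hin' with h | h
      · exact ⟨h, by simpa using hne⟩
      · cases h
  have hperm : D.Perm S := (List.perm_ext_iff_of_nodup hDnd hSnd).mpr hmem
  exact ((hperm.map editVal).sum_eq).symm
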